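-- pv_equiv track=rewrite | github.com/Nobody0321/MyCodes | OJ/笔试/顺丰_20190910第2题特殊计时.py | parseABC
-- ===== SOURCE A (Python) =====
-- def parseABC(s, d):
--     """
--     字符串转10进制
--     """
--     num = 0
--     dd = 1
--     for c in s[::-1]:
--         v = ord(c)
--         if ord('A') <= v <= ord('Z'):
--             num += ((v - ord('A') + 10) * dd)
--         else:
--             num += (int(c) * dd)
--         dd *= d
--     return num
-- ===== SOURCE B (Python) =====
-- def parseABC(s, d):
--     # Horner's method: one forward pass, no reversal, no place-value accumulator.
--     num = 0
--     for c in s: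
--         if 'A' <= c <= 'Z':
--             v = ord(c) - ord('A') + 10
--         else:
--             v = int(c)
--         num = num * d + v
--     return num
-- ===== Notes on version B (the rewrite author's own statement) =====
-- stated objective: simpler
-- what changed: Horner's method: a single forward left-to-right pass updating num = num*d + value, eliminating A's string reversal and its place-value power accumulator dd.
import Mathlib
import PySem

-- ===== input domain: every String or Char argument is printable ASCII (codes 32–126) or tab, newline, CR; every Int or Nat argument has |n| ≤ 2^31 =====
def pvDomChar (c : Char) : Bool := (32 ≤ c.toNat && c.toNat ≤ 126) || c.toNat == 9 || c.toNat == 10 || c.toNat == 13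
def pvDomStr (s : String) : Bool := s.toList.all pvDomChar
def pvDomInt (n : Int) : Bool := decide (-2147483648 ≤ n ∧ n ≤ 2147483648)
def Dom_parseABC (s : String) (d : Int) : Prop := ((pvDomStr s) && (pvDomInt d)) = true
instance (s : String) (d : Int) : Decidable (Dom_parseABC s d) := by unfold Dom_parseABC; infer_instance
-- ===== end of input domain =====

-- B replaces A's reversed pass with a place-value accumulator by a single forward Horner pass (simpler).


-- ===== PORT A =====
-- shared by both ports: the per-character value ('A'..'Z' → 10..35, else int(c)).
-- int(c) is PySem.Int.ofChars? [c]; the .getD 0 is never reached inside Pre_ (there c is a digit).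
def pvCharVal (c : Char) : Int :=
  if 65 ≤ c.toNat ∧ c.toNat ≤ 90 then (c.toNat : Int) - 65 + 10
  else (PySem.Int.ofChars? [c]).getD 0

-- literal port of A: iterate over s[::-1] keeping (num, dd), return num.
def parseABC (s : String) (d : Int) : Int :=
  (((PySem.List.slice? s.toList none none (-1)).getD []).foldl
    (fun (st : Int × Int) c => (st.1 + pvCharVal c * st.2, st.2 * d)) (0, 1)).1

-- ===== PORT B =====
-- literal port of B: forward Horner pass.
def parseABC_alt (s : String) (d : Int) : Int :=
  s.toList.foldl (fun num c => num * d + pvCharVal c) 0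

-- ===== PRECONDITION & SPEC =====
-- Pre_ excludes exactly the inputs on which Python A raises ValueError: a character
-- that is neither a decimal digit nor an uppercase letter makes int(c) raise.
def Pre_parseABC (s : String) (d : Int) : Prop :=
  (s.toList.all (fun c => (48 ≤ c.toNat && c.toNat ≤ 57) || (65 ≤ c.toNat && c.toNat ≤ 90))) = true
instance (s : String) (d : Int) : Decidable (Pre_parseABC s d) := by
  unfold Pre_parseABC; infer_instance
def pvWitness_parseABC : String × Int := ("1A", 16)

def Spec_parseABC (s : String) (d : Int) (out : Int) : Prop := out = parseABC_alt s d
instance (s : String) (d : Int) (out : Int) : Decidable (Spec_parseABC s d out) := by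
  unfold Spec_parseABC; infer_instance

-- ===== CLAIM (what is proved, stated in full; the proofs are below) =====
def Claim_equal_parseABC : Prop :=
  ∀ (s : String) (d : Int), Dom_parseABC s d → Pre_parseABC s d →
    Spec_parseABC s d (parseABC s d)

-- ===== LEMMAS AND PROOFS =====

-- polynomial value of a char list read low-order-first
def pvP (d : Int) : List Char → Int
  | [] => 0
  | c :: r => pvCharVal c + d * pvP d r

theorem pvFoldA_eq (d : Int) (r : List Char) :
    ∀ num dd : Int,
      (r.foldl (fun (st : Int × Int) c => (st.1 + pvCharVal c * st.2, st.2 * d)) (num, dd)).1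
        = num + dd * pvP d r := by
  induction r with
  | nil => intro num dd; simp [pvP]
  | cons c r ih =>
      intro num dd
      simp only [List.foldl_cons, pvP]
      rw [ih]
      ring

theorem pvP_append (d : Int) (r : List Char) (c : Char) :
    pvP d (r ++ [c]) = pvP d r + d ^ r.length * pvCharVal c := by
  induction r with
  | nil => simp [pvP]
  | cons a r ih => simp [pvP, ih, pow_succ]; ring

theorem pvFoldB_eq (d : Int) (l : List Char) :
    ∀ acc : Int,
      l.foldl (fun num c => num * d + pvCharVal c) acc
        = acc * d ^ l.length + pvP d l.reverse := by
  induction l with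
  | nil => intro acc; simp [pvP]
  | cons c l ih =>
      intro acc
      simp only [List.foldl_cons, List.reverse_cons, List.length_cons]
      rw [ih, pvP_append]
      simp [pow_succ]
      ring

-- ===== VERDICT (by name: the statement is the Claim_ definition above) =====
theorem parseABC_spec : Claim_equal_parseABC := by
  intro s d _ _
  unfold Spec_parseABC parseABC parseABC_alt
  rw [PySem.List.slice?_none_none_neg_one]
  simp only [Option.getD_some]
  rw [pvFoldA_eq, pvFoldB_eq]
  simp
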